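-- pv_equiv track=rewrite | github.com/dff652/ts-iteration-loop | src/utils/annotation_store.py | infer_source_kind
-- ===== SOURCE A (Python) =====
-- from typing import Any, Dict, List, Optional
--
-- def infer_source_kind(payload: Dict[str, Any], annotations: List[Dict[str, Any]]) -> str:
--     explicit = str(payload.get("source_kind") or "").strip().lower()
--     if explicit in {"auto", "human"}:
--         return explicit
--
--     saw_auto = False
--     saw_human = False
--     for ann in annotations:
--         source = str(ann.get("source") or "").strip().lower()
--         ann_id = str(ann.get("id") or "").strip().lower()
--         if source in {"auto", "inference"} or ann_id.startswith("auto_") or ann_id.startswith("infer_"):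
--             saw_auto = True
--         if source in {"human", "manual"}:
--             saw_human = True
--         if ann.get("expert_output") not in (None, "") or ann.get("expertOutput") not in (None, ""):
--             saw_human = True
--
--     if saw_human:
--         return "human"
--     if saw_auto:
--         return "auto"
--     return "human"
-- ===== SOURCE B (Python) =====
-- def infer_source_kind(payload, annotations):
--     explicit = str(payload.get("source_kind") or "").strip().lower()
--     if explicit in {"auto", "human"}:
--         return explicit
--
--     def is_human(ann):
--         source = str(ann.get("source") or "").strip().lower()
--         return (source in {"human", "manual"}
--                 or ann.get("expert_output") not in (None, "")
--                 or ann.get("expertOutput") not in (None, ""))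
--
--     if any(is_human(ann) for ann in annotations):
--         return "human"
--
--     def is_auto(ann):
--         source = str(ann.get("source") or "").strip().lower()
--         ann_id = str(ann.get("id") or "").strip().lower()
--         return (source in {"auto", "inference"}
--                 or ann_id.startswith("auto_") or ann_id.startswith("infer_"))
--
--     if any(is_auto(ann) for ann in annotations):
--         return "auto"
--     return "human"
-- ===== Notes on version B (the rewrite author's own statement) =====
-- stated objective: simpler
-- what changed: Replaces the single accumulating loop over (saw_auto, saw_human) flags with two short-circuiting any() scans: a first human-predicate pass that returns early, then an auto-predicate pass.
import Mathlib
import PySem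

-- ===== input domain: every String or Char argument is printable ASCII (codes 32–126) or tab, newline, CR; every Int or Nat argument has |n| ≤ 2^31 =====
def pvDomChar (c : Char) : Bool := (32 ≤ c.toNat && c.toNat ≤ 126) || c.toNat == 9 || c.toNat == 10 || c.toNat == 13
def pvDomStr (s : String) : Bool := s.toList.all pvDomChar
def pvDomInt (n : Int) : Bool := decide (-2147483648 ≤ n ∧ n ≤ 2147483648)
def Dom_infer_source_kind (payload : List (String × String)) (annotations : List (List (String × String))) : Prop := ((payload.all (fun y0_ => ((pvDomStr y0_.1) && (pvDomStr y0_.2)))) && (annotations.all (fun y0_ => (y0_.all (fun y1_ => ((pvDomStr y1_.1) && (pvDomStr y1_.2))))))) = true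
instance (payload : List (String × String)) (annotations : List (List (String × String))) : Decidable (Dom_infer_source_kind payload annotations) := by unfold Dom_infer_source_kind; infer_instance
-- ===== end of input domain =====

-- B replaces A's single accumulating flag loop with two short-circuiting predicate scans (simpler decomposition; same cost).

-- shared helper: d.get(k) as first-match lookup in the association list
def pvGet (d : List (String × String)) (k : String) : Option String := List.lookup k d

-- shared helper: str(d.get(k) or "").strip().lower()
def pvNormGet (d : List (String × String)) (k : String) : String :=
  PySem.Str.lower (PySem.Str.strip ((pvGet d k).getD ""))

-- helper: v not in (None, "")  for an Optional[str] value
def pvNotNoneEmpty (o : Option String) : Bool :=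
  match o with
  | some s => s ≠ ""
  | none => false

-- ===== PORT A =====
def infer_source_kind (payload : List (String × String)) (annotations : List (List (String × String))) : String :=
  let explicit := pvNormGet payload "source_kind"
  if explicit = "auto" ∨ explicit = "human" then explicit
  else
    let st := annotations.foldl (fun (st : Bool × Bool) ann =>
      let source := pvNormGet ann "source"
      let ann_id := pvNormGet ann "id"
      let saw_auto := if source = "auto" ∨ source = "inference" ∨
          PySem.Str.startswith ann_id "auto_" ∨ PySem.Str.startswith ann_id "infer_"
        then true else st.1
      let saw_human := if source = "human" ∨ source = "manual" then true else st.2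
      let saw_human := if pvNotNoneEmpty (pvGet ann "expert_output") ∨
          pvNotNoneEmpty (pvGet ann "expertOutput")
        then true else saw_human
      (saw_auto, saw_human)) (false, false)
    if st.2 then "human" else if st.1 then "auto" else "human"

-- ===== PORT B =====
def pvIsHuman (ann : List (String × String)) : Bool :=
  let source := pvNormGet ann "source"
  (source = "human" || source = "manual") ||
    pvNotNoneEmpty (pvGet ann "expert_output") ||
    pvNotNoneEmpty (pvGet ann "expertOutput")

def pvIsAuto (ann : List (String × String)) : Bool :=
  let source := pvNormGet ann "source"
  let ann_id := pvNormGet ann "id"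
  (source = "auto" || source = "inference") ||
    PySem.Str.startswith ann_id "auto_" || PySem.Str.startswith ann_id "infer_"

def infer_source_kind_alt (payload : List (String × String)) (annotations : List (List (String × String))) : String :=
  let explicit := pvNormGet payload "source_kind"
  if explicit = "auto" ∨ explicit = "human" then explicit
  else if annotations.any pvIsHuman then "human"
  else if annotations.any pvIsAuto then "auto"
  else "human"

-- ===== PRECONDITION & SPEC =====
def Spec_infer_source_kind (payload : List (String × String)) (annotations : List (List (String × String))) (out : String) : Prop := out = infer_source_kind_alt payload annotations
instance (payload : List (String × String)) (annotations : List (List (String × String))) (out : String) : Decidable (Spec_infer_source_kind payload annotations out) := by unfold Spec_infer_source_kind; infer_instance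

-- ===== CLAIM (what is proved, stated in full; the proofs are below) =====
def Claim_equal_infer_source_kind : Prop := ∀ (payload : List (String × String)) (annotations : List (List (String × String))), Dom_infer_source_kind payload annotations → Spec_infer_source_kind payload annotations (infer_source_kind payload annotations)

-- ===== LEMMAS AND PROOFS =====
theorem pv_fold_eq (l : List (List (String × String))) (st : Bool × Bool) :
    l.foldl (fun (st : Bool × Bool) ann =>
      let source := pvNormGet ann "source"
      let ann_id := pvNormGet ann "id"
      let saw_auto := if source = "auto" ∨ source = "inference" ∨
          PySem.Str.startswith ann_id "auto_" ∨ PySem.Str.startswith ann_id "infer_"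
        then true else st.1
      let saw_human := if source = "human" ∨ source = "manual" then true else st.2
      let saw_human := if pvNotNoneEmpty (pvGet ann "expert_output") ∨
          pvNotNoneEmpty (pvGet ann "expertOutput")
        then true else saw_human
      (saw_auto, saw_human)) st = (st.1 || l.any pvIsAuto, st.2 || l.any pvIsHuman) := by
  induction l generalizing st with
  | nil => simp
  | cons a t ih =>
    simp only [List.foldl_cons, List.any_cons, ih]
    simp only [pvIsAuto, pvIsHuman, Prod.mk.injEq]
    constructor <;>
      simp [Bool.or_comm, Bool.or_left_comm, Bool.or_assoc]

theorem infer_source_kind_eq (payload : List (String × String)) (annotations : List (List (String × String))) :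
    infer_source_kind payload annotations = infer_source_kind_alt payload annotations := by
  unfold infer_source_kind infer_source_kind_alt
  simp only [pv_fold_eq]
  split_ifs <;> simp_all

-- ===== VERDICT (by name: the statement is the Claim_ definition above) =====
theorem infer_source_kind_spec : Claim_equal_infer_source_kind := by
  intro payload annotations _
  unfold Spec_infer_source_kind
  exact infer_source_kind_eq payload annotations
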